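-- pv_equiv track=rewrite | github.com/c0rwil/codegrimoire | src/code_grimoire.py | parse_lua_file
-- ===== SOURCE A (Python) =====
-- def parse_lua_file(file_content):
--     code_lines = 0
--     comment_lines = 0
--     inside_block_comment = False
--
--     for line in file_content.splitlines():
--         stripped_line = line.strip()
--
--         # Handle block comments
--         if stripped_line.startswith("--[[") or inside_block_comment:
--             inside_block_comment = True
--             comment_lines += 1
--             if stripped_line.endswith("--]]"):
--                 inside_block_comment = False
--             continue
--
--         # Handle single-line comments
--         if stripped_line.startswith("--") and not stripped_line.startswith("--[["):
--             comment_lines += 1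
--             continue
--
--         # Non-empty and non-comment line is considered as a code line
--         if stripped_line and not inside_block_comment:
--             code_lines += 1
--
--     return code_lines, comment_lines
-- ===== SOURCE B (Python) =====
-- def parse_lua_file(file_content):
--     lines = [ln.strip() for ln in file_content.splitlines()]
--     code_lines = 0
--     comment_lines = 0
--     n = len(lines)
--     i = 0
--     while i < n:
--         s = lines[i]
--         if s.startswith("--[["):
--             comment_lines += 1
--             if not s.endswith("--]]"):
--                 # consume the rest of the block comment
--                 i += 1
--                 while i < n:
--                     comment_lines += 1
--                     if lines[i].endswith("--]]"):
--                         break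
--                     i += 1
--         elif s.startswith("--"):
--             comment_lines += 1
--         elif s:
--             code_lines += 1
--         i += 1
--     return code_lines, comment_lines
-- ===== Notes on version B (the rewrite author's own statement) =====
-- stated objective: alternative
-- what changed: Replaces A's single for-loop carrying an inside_block_comment flag by an indexed while-scan over pre-stripped lines with an explicit inner loop that consumes an entire block comment at once, so no boolean state crosses iterations.
import Mathlib
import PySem

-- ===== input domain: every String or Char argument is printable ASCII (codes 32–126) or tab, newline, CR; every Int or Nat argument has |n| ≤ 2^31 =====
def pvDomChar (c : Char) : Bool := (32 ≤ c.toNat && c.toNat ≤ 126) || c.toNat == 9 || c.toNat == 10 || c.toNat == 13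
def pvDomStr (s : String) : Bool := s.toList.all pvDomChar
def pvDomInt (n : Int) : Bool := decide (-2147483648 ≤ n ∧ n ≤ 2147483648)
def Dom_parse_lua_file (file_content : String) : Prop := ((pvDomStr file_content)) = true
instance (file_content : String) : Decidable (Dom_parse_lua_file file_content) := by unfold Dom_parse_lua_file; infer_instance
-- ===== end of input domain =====

-- B replaces A's carried inside_block_comment flag by an indexed scan with an explicit
-- inner loop that consumes a whole block comment at once (objective: alternative decomposition).

-- ===== PORT A =====
-- one step of A's for-loop; state = (code_lines, comment_lines, inside_block_comment)
def pvAStep (st : Int × Int × Bool) (line : String) : Int × Int × Bool :=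
  let s := PySem.Str.strip line
  if PySem.Str.startswith s "--[[" || st.2.2 then
    -- inside_block_comment := true; comment += 1; closed again if line ends with "--]]"
    (st.1, st.2.1 + 1, !PySem.Str.endswith s "--]]")
  else if PySem.Str.startswith s "--" && !PySem.Str.startswith s "--[[" then
    (st.1, st.2.1 + 1, st.2.2)
  else if s ≠ "" && !st.2.2 then
    (st.1 + 1, st.2.1, st.2.2)
  else st

def parse_lua_file (file_content : String) : Int × Int :=
  let r := (PySem.Str.splitlines file_content).foldl pvAStep (0, 0, false)
  (r.1, r.2.1)

-- ===== PORT B =====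
mutual
  -- outer while-loop of B over the stripped lines
  def pvBGo : List String → Int × Int
    | [] => (0, 0)
    | s :: rest =>
      if PySem.Str.startswith s "--[[" then
        if PySem.Str.endswith s "--]]" then
          let r := pvBGo rest
          (r.1, r.2 + 1)
        else
          let r := pvBConsume rest
          (r.1, r.2 + 1)
      else if PySem.Str.startswith s "--" then
        let r := pvBGo rest
        (r.1, r.2 + 1)
      else if s ≠ "" then
        let r := pvBGo rest
        (r.1 + 1, r.2)
      else pvBGo rest
  -- inner while-loop: count comment lines until one ends with "--]]"
  def pvBConsume : List String → Int × Int
    | [] => (0, 0)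
    | s :: rest =>
      if PySem.Str.endswith s "--]]" then
        let r := pvBGo rest
        (r.1, r.2 + 1)
      else
        let r := pvBConsume rest
        (r.1, r.2 + 1)
end

def parse_lua_file_alt (file_content : String) : Int × Int :=
  pvBGo ((PySem.Str.splitlines file_content).map PySem.Str.strip)

-- ===== PRECONDITION & SPEC =====
def Spec_parse_lua_file (file_content : String) (out : Int × Int) : Prop := out = parse_lua_file_alt file_content
instance (file_content : String) (out : Int × Int) : Decidable (Spec_parse_lua_file file_content out) := by unfold Spec_parse_lua_file; infer_instance

-- ===== CLAIM (what is proved, stated in full; the proofs are below) =====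
def Claim_equal_parse_lua_file : Prop := ∀ (file_content : String), Dom_parse_lua_file file_content → Spec_parse_lua_file file_content (parse_lua_file file_content)

-- ===== LEMMAS AND PROOFS =====

-- Joint loop invariant: from a clean state A's fold adds pvBGo's counts, from an
-- open-block state it adds pvBConsume's counts (the final flag is irrelevant to the output).
theorem pvFold_inv (ls : List String) :
    (∀ c m : Int,
      (ls.foldl pvAStep (c, m, false)).1
        = c + (pvBGo (ls.map PySem.Str.strip)).1 ∧
      (ls.foldl pvAStep (c, m, false)).2.1
        = m + (pvBGo (ls.map PySem.Str.strip)).2) ∧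
    (∀ c m : Int,
      (ls.foldl pvAStep (c, m, true)).1
        = c + (pvBConsume (ls.map PySem.Str.strip)).1 ∧
      (ls.foldl pvAStep (c, m, true)).2.1
        = m + (ls.map PySem.Str.strip |> pvBConsume).2) := by
  induction ls with
  | nil => simp [pvBGo, pvBConsume]
  | cons s rest ih =>
    obtain ⟨ih₁, ih₂⟩ := ih
    constructor
    · intro c m
      by_cases h1 : PySem.Chars.startswith (PySem.Chars.strip s.toList) ['-','-','[','['] = true
      · by_cases h2 : PySem.Chars.endswith (PySem.Chars.strip s.toList) ['-','-',']',']'] = true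
        · have := ih₁ c (m + 1)
          simp [pvBGo, pvAStep, h1, h2] at this ⊢
          omega
        · have := ih₂ c (m + 1)
          simp [pvBGo, pvAStep, h1, h2] at this ⊢
          omega
      · by_cases h3 : PySem.Chars.startswith (PySem.Chars.strip s.toList) ['-','-'] = true
        · have := ih₁ c (m + 1)
          simp [pvBGo, pvAStep, h1, h3] at this ⊢
          omega
        · by_cases h4 : PySem.Str.strip s = ""
          · have := ih₁ c m
            have e1 : PySem.Chars.startswith ([] : List Char) ['-','-','[','['] = false := by decide
            have e2 : PySem.Chars.startswith ([] : List Char) ['-','-'] = false := by decide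
            simp [pvBGo, pvAStep, h4, e1, e2] at this ⊢
            omega
          · have := ih₁ (c + 1) m
            simp [pvBGo, pvAStep, h1, h3, h4] at this ⊢
            omega
    · intro c m
      by_cases h2 : PySem.Chars.endswith (PySem.Chars.strip s.toList) ['-','-',']',']'] = true
      · have := ih₁ c (m + 1)
        simp [pvBConsume, pvAStep, h2] at this ⊢
        omega
      · have := ih₂ c (m + 1)
        simp [pvBConsume, pvAStep, h2] at this ⊢
        omega

-- ===== VERDICT (by name: the statement is the Claim_ definition above) =====
theorem parse_lua_file_spec : Claim_equal_parse_lua_file := by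
  intro fc _
  unfold Spec_parse_lua_file parse_lua_file parse_lua_file_alt
  have h := (pvFold_inv (PySem.Str.splitlines fc)).1 0 0
  obtain ⟨h1, h2⟩ := h
  simp at h1 h2
  exact Prod.ext h1 h2
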